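-- pv_equiv track=rewrite | github.com/kanguju/coding-test | largest_number.py | book_solution_1
-- ===== SOURCE A (Python) =====
-- def book_solution_1(nums: list[int]) -> int:
--     sum = 0
--     pair = []
--     nums.sort()
--
--     for n in nums:
--         # 앞에서부터 오름차순으로 페어를 만들어서 합 계산
--         pair.append(n)
--         if len(pair) == 2:
--             sum += min(pair)
--             pair = []
--
--     return sum
-- ===== SOURCE B (Python) =====
-- def book_solution_1(nums: list[int]) -> int:
--     # Selection, no sorting: repeatedly pull out the two smallest remaining
--     # elements; the smaller one is the min of that pair.
--     rest = list(nums)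
--     total = 0
--     while len(rest) >= 2:
--         a = min(rest)
--         rest.remove(a)
--         rest.remove(min(rest))
--         total += a
--     return total
-- ===== Notes on version B (the rewrite author's own statement) =====
-- stated objective: alternative
-- what changed: B does not sort at all: it repeatedly extracts the minimum and the second minimum from the remaining multiset (selection), adding the minimum of each extracted pair, instead of sorting and scanning a pair buffer; B also does not mutate the caller's list (A sorts it in place).
import Mathlib
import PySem

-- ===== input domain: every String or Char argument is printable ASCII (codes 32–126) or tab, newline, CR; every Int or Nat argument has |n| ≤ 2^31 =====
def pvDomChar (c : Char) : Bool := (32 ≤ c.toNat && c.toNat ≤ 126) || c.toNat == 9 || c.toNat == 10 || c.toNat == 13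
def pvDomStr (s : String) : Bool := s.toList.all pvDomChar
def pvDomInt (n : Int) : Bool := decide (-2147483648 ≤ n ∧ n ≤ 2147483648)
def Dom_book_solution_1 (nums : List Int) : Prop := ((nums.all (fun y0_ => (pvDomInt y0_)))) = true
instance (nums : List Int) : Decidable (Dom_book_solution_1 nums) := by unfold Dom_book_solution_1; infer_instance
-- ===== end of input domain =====

-- B uses no sort: it repeatedly extracts the minimum and the second minimum (selection) and
-- adds the minimum of each extracted pair. Return values agree; side effects differ: A sorts
-- the caller's list in place, B works on a copy (the equivalence proved is about the return value).

-- ===== PORT A =====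
-- A's loop step: append n to the pair buffer; when it holds two elements, add min(pair) and reset.
-- (min(pair) is PySem.List.minD with default 0; the default is never used, since the branch
-- fires only when the buffer has exactly two elements.)
def pvStepA (st : Int × List Int) (n : Int) : Int × List Int :=
  let pair := st.2 ++ [n]
  if pair.length == 2 then (st.1 + PySem.List.minD pair (fun x => x) 0, [])
  else (st.1, pair)

def book_solution_1 (nums : List Int) : Int :=
  let s := PySem.List.sorted nums (fun x => x)
  (s.foldl pvStepA (0, [])).1

-- ===== PORT B =====
-- B's while loop, fuel-bounded by the initial length (which always suffices: each iteration
-- removes two elements). min() / list.remove() are PySem.List.min? / remove?; their `none`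
-- cases (empty list / absent value) are unreachable under the loop guard `length ≥ 2`, and
-- the fallback there merely makes the function total.
def pvLoopB : Nat → List Int → Int → Int
  | 0, _, total => total
  | fuel + 1, rest, total =>
    if rest.length ≥ 2 then
      match PySem.List.min? rest (fun y => y) with
      | none => total
      | some a =>
        match PySem.List.remove? rest a with
        | none => total
        | some r1 =>
          match PySem.List.min? r1 (fun y => y) with
          | none => total
          | some b =>
            match PySem.List.remove? r1 b with
            | none => total
            | some r2 => pvLoopB fuel r2 (total + a)
    else total

def book_solution_1_alt (nums : List Int) : Int :=
  pvLoopB nums.length nums 0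

-- ===== PRECONDITION & SPEC =====
def Spec_book_solution_1 (nums : List Int) (out : Int) : Prop := out = book_solution_1_alt nums
instance (nums : List Int) (out : Int) : Decidable (Spec_book_solution_1 nums out) := by unfold Spec_book_solution_1; infer_instance

-- ===== CLAIM (what is proved, stated in full; the proofs are below) =====
def Claim_equal_book_solution_1 : Prop := ∀ (nums : List Int), Dom_book_solution_1 nums → Spec_book_solution_1 nums (book_solution_1 nums)

-- ===== LEMMAS AND PROOFS =====

-- The value both programs compute: sum of min of consecutive pairs of the ascending arrangement.
def pvPairSum : List Int → Int
  | a :: b :: t => min a b + pvPairSum t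
  | _ => 0

theorem pvMinD_pair (a b : Int) :
    PySem.List.minD [a, b] (fun x => x) 0 = min a b := by
  simp [PySem.List.minD, PySem.List.min?]
  split_ifs <;> simp <;> omega

-- A's loop computes pvPairSum of its (sorted) input.
theorem pvLoopA_eq : ∀ (l : List Int) (s : Int),
    (l.foldl pvStepA (s, ([] : List Int))).1 = s + pvPairSum l
  | [], s => by simp [pvPairSum]
  | [a], s => by simp [pvStepA, pvPairSum]
  | a :: b :: t, s => by
      have h1 : pvStepA (s, []) a = (s, [a]) := by simp [pvStepA]
      have h2 : pvStepA (s, [a]) b = (s + min a b, []) := by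
        simp [pvStepA, pvMinD_pair]
      simp only [List.foldl_cons, h1, h2, pvLoopA_eq t (s + min a b), pvPairSum]
      ring

-- Peeling the minimum off a list peels the head off its ascending arrangement.
theorem pvSorted_erase_min (l : List Int) (a : Int)
    (ha : PySem.List.min? l (fun y => y) = some a) :
    PySem.List.sorted l (fun x => x) = a :: PySem.List.sorted (l.erase a) (fun x => x) := by
  have hmem : a ∈ l := PySem.List.min?_mem ha
  have hmin : ∀ y ∈ l, a ≤ y := by
    intro y hy; exact PySem.List.min?_isMin ha y hy
  refine PySem.List.sorted_id_eq_of_perm_of_pairwise _ _ ?_ ?_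
  · exact ((PySem.List.sorted_perm (l.erase a) (fun x => x) false).cons a).trans
      (List.perm_cons_erase hmem).symm
  · refine List.pairwise_cons.mpr ⟨?_, PySem.List.sorted_pairwise (l.erase a) (fun x => x)⟩
    intro y hy
    exact hmin y (l.erase_subset ((PySem.List.mem_sorted _ _ _ _).mp hy))

-- B's loop computes pvPairSum of the ascending arrangement of the remaining multiset.
theorem pvLoopB_eq : ∀ (fuel : Nat) (l : List Int) (t : Int), l.length ≤ fuel →
    pvLoopB fuel l t = t + pvPairSum (PySem.List.sorted l (fun x => x))
  | 0, l, t, h => by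
      have hl : l = [] := List.length_eq_zero_iff.mp (Nat.le_zero.mp h)
      subst hl
      have hs : PySem.List.sorted ([] : List Int) (fun x => x) = [] := by decide
      rw [hs]; simp [pvLoopB, pvPairSum]
  | fuel + 1, l, t, h => by
      by_cases hlen : l.length ≥ 2
      · obtain ⟨x, l', rfl⟩ : ∃ x l', l = x :: l' := by
          cases l with
          | nil => simp at hlen
          | cons x l' => exact ⟨x, l', rfl⟩
        have ha : PySem.List.min? (x :: l') (fun y => y) = some (l'.foldl min x) :=
          PySem.List.min?_id_cons x l'
        set a := l'.foldl min x with ha_def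
        have hamem : a ∈ x :: l' := PySem.List.min?_mem ha
        have hr1 : PySem.List.remove? (x :: l') a = some ((x :: l').erase a) :=
          PySem.List.remove?_eq_some_erase (x :: l') a hamem
        have hlen1 : ((x :: l').erase a).length = l'.length := by
          rw [List.length_erase_of_mem hamem]; simp
        obtain ⟨y, ys, hys⟩ : ∃ y ys, (x :: l').erase a = y :: ys := by
          cases he : (x :: l').erase a with
          | nil => rw [he] at hlen1; simp at hlen1; simp at hlen; omega
          | cons y ys => exact ⟨y, ys, rfl⟩
        have hb : PySem.List.min? ((x :: l').erase a) (fun y => y)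
            = some (ys.foldl min y) := by rw [hys]; exact PySem.List.min?_id_cons y ys
        set b := ys.foldl min y with hb_def
        have hbmem : b ∈ (x :: l').erase a := PySem.List.min?_mem hb
        have hr2 : PySem.List.remove? ((x :: l').erase a) b = some (((x :: l').erase a).erase b) :=
          PySem.List.remove?_eq_some_erase ((x :: l').erase a) b hbmem
        have hab : a ≤ b := PySem.List.min?_isMin ha b (List.erase_subset hbmem)
        have hlen2 : (((x :: l').erase a).erase b).length ≤ fuel := by
          rw [List.length_erase_of_mem hbmem, hlen1]
          simp at h hlen ⊢; omega
        have hrec := pvLoopB_eq fuel (((x :: l').erase a).erase b) (t + a) hlen2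
        have hsplit : PySem.List.sorted (x :: l') (fun y => y)
            = a :: b :: PySem.List.sorted (((x :: l').erase a).erase b) (fun y => y) := by
          rw [pvSorted_erase_min _ a ha, pvSorted_erase_min _ b hb]
        conv_lhs => rw [pvLoopB.eq_def]
        simp only [if_pos hlen, ha, hr1, hb, hr2]
        rw [hrec, hsplit, pvPairSum, min_eq_left hab]
        ring
      · conv_lhs => rw [pvLoopB.eq_def]
        simp only [if_neg hlen]
        have hl2 : (PySem.List.sorted l (fun x => x)).length < 2 := by
          rw [PySem.List.length_sorted]; omega
        cases hs : PySem.List.sorted l (fun x => x) with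
        | nil => simp [pvPairSum]
        | cons y ys =>
            cases ys with
            | nil => simp [pvPairSum]
            | cons z zs => rw [hs] at hl2; simp at hl2

-- ===== VERDICT (by name: the statement is the Claim_ definition above) =====
theorem book_solution_1_spec : Claim_equal_book_solution_1 := by
  intro nums _
  unfold Spec_book_solution_1 book_solution_1 book_solution_1_alt
  simp only
  rw [pvLoopA_eq, pvLoopB_eq nums.length nums 0 le_rfl, zero_add]
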